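-- pv_equiv track=rewrite | github.com/mhered/pybites | 225/save1_passed.py | convert_pybites_chars
-- ===== SOURCE A (Python) =====
-- PYBITES = "pybites"
--
-- def convert_pybites_chars(text):
--     """Swap case all characters in the word pybites for the given text.
--        Return the resulting string."""
--     result=[]
--     for letter in text:
--         if letter in PYBITES:
--             letter = letter.upper()
--         elif letter in PYBITES.upper():
--             letter = letter.lower()
--         result.append(letter)
--     return "".join(result)
-- ===== SOURCE B (Python) =====
-- PYBITES = "pybites"
--
-- _TABLE = str.maketrans(PYBITES + PYBITES.upper(), PYBITES.upper() + PYBITES)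
--
-- def convert_pybites_chars(text):
--     """Swap case all characters in the word pybites for the given text.
--        Return the resulting string."""
--     return text.translate(_TABLE)
-- ===== Notes on version B (the rewrite author's own statement) =====
-- stated objective: idiomatic
-- what changed: Replaces the per-character if/elif membership scans and list-append loop by a translation table built once with str.maketrans and a single table-driven text.translate pass.
import Mathlib
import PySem

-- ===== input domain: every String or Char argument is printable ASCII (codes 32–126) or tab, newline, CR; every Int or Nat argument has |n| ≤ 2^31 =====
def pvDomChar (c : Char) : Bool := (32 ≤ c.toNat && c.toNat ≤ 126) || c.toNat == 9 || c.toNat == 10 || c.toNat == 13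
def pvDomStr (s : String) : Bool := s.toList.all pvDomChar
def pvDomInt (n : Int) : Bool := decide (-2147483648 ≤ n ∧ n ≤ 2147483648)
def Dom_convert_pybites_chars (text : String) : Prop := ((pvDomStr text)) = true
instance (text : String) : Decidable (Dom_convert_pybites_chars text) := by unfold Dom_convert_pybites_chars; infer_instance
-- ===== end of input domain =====

-- B replaces A's per-character if/elif membership scans with a translation table built
-- once (str.maketrans) and a single table-driven pass (str.translate); same O(n) cost.


-- ===== PORT A =====
-- 'letter in PYBITES' on a single character is exactly list membership in PYBITES's chars;
-- letter.upper()/letter.lower() on a single character is PySem.Chars.upperChar/lowerChar.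
def convert_pybites_chars (text : String) : String :=
  String.ofList (text.toList.foldl (fun result letter =>
    let letter :=
      if letter ∈ "pybites".toList then PySem.Chars.upperChar letter
      else if letter ∈ (PySem.Chars.upper "pybites".toList) then PySem.Chars.lowerChar letter
      else letter
    result ++ [letter]) [])

-- ===== PORT B =====
-- str.maketrans(x, y): zip the two strings into a char→char table (later pairs overwrite).
def pvTransTable : PySem.Dict Char Char :=
  (List.zip ("pybites".toList ++ (PySem.Chars.upper "pybites".toList))
            ((PySem.Chars.upper "pybites".toList) ++ "pybites".toList)).foldl
    (fun d p => d.insert p.1 p.2) PySem.Dict.empty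

-- text.translate(table): map each char through the table, absent keys pass through.
def convert_pybites_chars_alt (text : String) : String :=
  String.ofList (text.toList.map (fun c => pvTransTable.getD c c))

-- ===== PRECONDITION & SPEC =====
def Spec_convert_pybites_chars (text : String) (out : String) : Prop := out = convert_pybites_chars_alt text
instance (text : String) (out : String) : Decidable (Spec_convert_pybites_chars text out) := by unfold Spec_convert_pybites_chars; infer_instance

-- ===== CLAIM (what is proved, stated in full; the proofs are below) =====
def Claim_equal_convert_pybites_chars : Prop := ∀ (text : String), Dom_convert_pybites_chars text → Spec_convert_pybites_chars text (convert_pybites_chars text)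

-- ===== LEMMAS AND PROOFS =====

theorem pvFoldl_append_map (f : Char → Char) :
    ∀ (l acc : List Char), l.foldl (fun r x => r ++ [f x]) acc = acc ++ l.map f := by
  intro l
  induction l with
  | nil => simp
  | cons x xs ih => intro acc; simp [List.foldl, ih]

theorem pvTable_eval : pvTransTable =
    PySem.Dict.mk [('p','P'),('y','Y'),('b','B'),('i','I'),('t','T'),('e','E'),('s','S'),
                   ('P','p'),('Y','y'),('B','b'),('I','i'),('T','t'),('E','e'),('S','s')] := by
  decide

theorem pvStep_eq (c : Char) :
    (if c ∈ "pybites".toList then PySem.Chars.upperChar c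
     else if c ∈ (PySem.Chars.upper "pybites".toList) then PySem.Chars.lowerChar c
     else c) = pvTransTable.getD c c := by
  rw [pvTable_eval]
  by_cases h1 : c = 'p'; · subst h1; decide
  by_cases h2 : c = 'y'; · subst h2; decide
  by_cases h3 : c = 'b'; · subst h3; decide
  by_cases h4 : c = 'i'; · subst h4; decide
  by_cases h5 : c = 't'; · subst h5; decide
  by_cases h6 : c = 'e'; · subst h6; decide
  by_cases h7 : c = 's'; · subst h7; decide
  by_cases h8 : c = 'P'; · subst h8; decide
  by_cases h9 : c = 'Y'; · subst h9; decide
  by_cases h10 : c = 'B'; · subst h10; decide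
  by_cases h11 : c = 'I'; · subst h11; decide
  by_cases h12 : c = 'T'; · subst h12; decide
  by_cases h13 : c = 'E'; · subst h13; decide
  by_cases h14 : c = 'S'; · subst h14; decide
  have hm1 : c ∉ "pybites".toList := by
    rw [show "pybites".toList = ['p','y','b','i','t','e','s'] from rfl]
    simp [h1, h2, h3, h4, h5, h6, h7]
  have hm2 : c ∉ (PySem.Chars.upper "pybites".toList) := by
    rw [show PySem.Chars.upper "pybites".toList = ['P','Y','B','I','T','E','S'] from by decide]
    simp [h8, h9, h10, h11, h12, h13, h14]
  rw [if_neg hm1, if_neg hm2]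
  simp [PySem.Dict.getD_eq_get?_getD, PySem.Dict.get?_mk_cons,
        Ne.symm h1, Ne.symm h2, Ne.symm h3, Ne.symm h4, Ne.symm h5, Ne.symm h6, Ne.symm h7,
        Ne.symm h8, Ne.symm h9, Ne.symm h10, Ne.symm h11, Ne.symm h12, Ne.symm h13, Ne.symm h14, PySem.Dict.get?]
-- ===== VERDICT (by name: the statement is the Claim_ definition above) =====
theorem convert_pybites_chars_spec : Claim_equal_convert_pybites_chars := by
  intro text _
  unfold Spec_convert_pybites_chars convert_pybites_chars convert_pybites_chars_alt
  rw [pvFoldl_append_map]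
  simp only [List.nil_append]
  congr 1
  apply List.map_congr_left
  intro c _
  exact pvStep_eq c
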